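-- pv_equiv track=rewrite | github.com/flerdacodeu/CodeU-2018-Group2 | SilverSolver/assignment1/Q1.py | are_sentences_anagram
-- ===== SOURCE A (Python) =====
-- def are_words_anagram(s1, s2, case_sensitive=False, return_dicts=False):
--     alphabet = "abcdefghijklmnopqrstuvwxyz"
--     if not case_sensitive:
--         s1 = s1.lower()
--         s2 = s2.lower()
--     else:
--         alphabet += alphabet.upper()
--     alphabet += "0123456789"
--     s1 = s1.strip()         # Ignoring spaces
--     s2 = s2.strip()
--
--     char_counter_1 = dict.fromkeys(list(alphabet), 0)
--     char_counter_2 = char_counter_1.copy()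
--     for c in s1:
--         if c in char_counter_1.keys():
--             char_counter_1[c] += 1
--     for c in s2:
--         if c in char_counter_2.keys():
--             char_counter_2[c] += 1
--
--     if return_dicts:
--         return (char_counter_1, char_counter_2)
--     else:
--         return char_counter_1 == char_counter_2
--
-- def are_sentences_anagram(s1, s2, case_sensitive=False):
--     s1 = s1.strip()
--     s2 = s2.strip()
--     words1 = s1.split()
--     words2 = s2.split()
--     if len(words1) != len(words2):
--         return False
--     else:
--         words_counter_1 = dict()
--         words_counter_2 = dict()
--         for i in range(len(words1)):
--             w1, w2 = are_words_anagram(words1[i], words2[i], \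
--                      case_sensitive=case_sensitive, return_dicts=True)
--             w1 = frozenset(w1.items())
--             w2 = frozenset(w2.items())
--             if w1 not in words_counter_1.keys():
--                 words_counter_1[w1] = 1
--             else:
--                 words_counter_1[w1] += 1
--             if w2 not in words_counter_2.keys():
--                 words_counter_2[w2] = 1
--             else:
--                 words_counter_2[w2] += 1
--         return words_counter_1 == words_counter_2
-- ===== SOURCE B (Python) =====
-- def are_sentences_anagram(s1, s2, case_sensitive=False):
--     alphabet = "abcdefghijklmnopqrstuvwxyz0123456789"
--     if case_sensitive:
--         alphabet += "ABCDEFGHIJKLMNOPQRSTUVWXYZ"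
--
--     def sig(w):
--         if not case_sensitive:
--             w = w.lower()
--         return "".join(sorted(c for c in w if c in alphabet))
--
--     words1 = s1.split()
--     words2 = s2.split()
--     if len(words1) != len(words2):
--         return False
--     balance = {}
--     for w in words1:
--         k = sig(w)
--         balance[k] = balance.get(k, 0) + 1
--     for w in words2:
--         k = sig(w)
--         balance[k] = balance.get(k, 0) - 1
--     return all(v == 0 for v in balance.values())
-- ===== Notes on version B (the rewrite author's own statement) =====
-- stated objective: simpler
-- what changed: Per-word full-alphabet count dicts turned into frozenset signatures and two signature-frequency dicts compared at the end are replaced by a sorted-filtered-characters canonical string per word and a single +1/-1 balance dict checked for all zeros.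
import Mathlib
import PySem

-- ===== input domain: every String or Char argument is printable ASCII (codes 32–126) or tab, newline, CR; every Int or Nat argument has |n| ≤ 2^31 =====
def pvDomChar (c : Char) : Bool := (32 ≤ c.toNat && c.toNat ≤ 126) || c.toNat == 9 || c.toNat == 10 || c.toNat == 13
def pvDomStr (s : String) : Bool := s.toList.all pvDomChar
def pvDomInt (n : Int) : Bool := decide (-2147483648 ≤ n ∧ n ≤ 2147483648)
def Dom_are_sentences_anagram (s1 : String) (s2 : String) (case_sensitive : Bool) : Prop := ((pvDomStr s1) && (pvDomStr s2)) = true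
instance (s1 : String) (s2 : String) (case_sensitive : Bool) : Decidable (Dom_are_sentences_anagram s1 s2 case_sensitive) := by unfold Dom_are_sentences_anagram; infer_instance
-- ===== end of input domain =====

-- B replaces A's per-word alphabet count dicts / frozenset signatures and the two
-- signature-frequency dicts by a sorted-filtered-characters signature per word and a
-- single +1/-1 balance dict checked for all zeros (objective: simpler).

-- ===== PORT A =====
-- alphabet as built by are_words_anagram: lowercase, += uppercase when case_sensitive, += digits
def pvAlphaA (cs : Bool) : List Char :=
  (if cs then "abcdefghijklmnopqrstuvwxyz".toList ++ "ABCDEFGHIJKLMNOPQRSTUVWXYZ".toList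
   else "abcdefghijklmnopqrstuvwxyz".toList) ++ "0123456789".toList

-- are_words_anagram's per-word count dict (both its calls use this builder symmetrically):
-- dict.fromkeys(list(alphabet), 0), then 'for c in w: if c in keys: d[c] += 1'
def pvWordDict (w : List Char) (cs : Bool) : PySem.Dict Char Int :=
  let w1 := if cs then w else PySem.Chars.lower w
  let w2 := PySem.Chars.strip w1
  let d0 : PySem.Dict Char Int := (pvAlphaA cs).foldl (fun d c => d.insert c 0) PySem.Dict.empty
  w2.foldl (fun d c => if d.contains c then d.insert c (d.getD c 0 + 1) else d) d0

-- frozenset(d.items())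
def pvSigA (w : List Char) (cs : Bool) : PySem.Set (Char × Int) :=
  PySem.Set.ofList (pvWordDict w cs).items

-- A's dicts are KEYED BY FROZENSETS, whose Python equality is set equality, so the dict is
-- hand-ported as an association list whose key test is PySem.Set.equal (exact).
-- first-match lookup, as Python dict lookup:
def pvFsGet? (m : List (PySem.Set (Char × Int) × Int)) (k : PySem.Set (Char × Int)) : Option Int :=
  match m with
  | [] => none
  | p :: rest => if PySem.Set.equal p.1 k then some p.2 else pvFsGet? rest k

-- 'if k not in d: d[k] = 1 else: d[k] += 1' (new keys append, as Python dicts)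
def pvBump (m : List (PySem.Set (Char × Int) × Int)) (k : PySem.Set (Char × Int)) :
    List (PySem.Set (Char × Int) × Int) :=
  match m with
  | [] => [(k, 1)]
  | p :: rest => if PySem.Set.equal p.1 k then (p.1, p.2 + 1) :: rest else p :: pvBump rest k

-- Python's '==' on two dicts (order-insensitive): same size and every key of m1 has the
-- same value in m2 — exact, both dicts here have unique keys
def pvFsDictEq (m1 m2 : List (PySem.Set (Char × Int) × Int)) : Bool :=
  m1.length == m2.length && m1.all (fun p => pvFsGet? m2 p.1 == some p.2)

-- the loop 'for i in range(len(words1))' building the two signature-frequency dicts,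
-- walked as the zip of the two equal-length word lists
def pvSentCounters (ws : List (List Char × List Char)) (cs : Bool) :
    List (PySem.Set (Char × Int) × Int) × List (PySem.Set (Char × Int) × Int) :=
  ws.foldl (fun mm pr => (pvBump mm.1 (pvSigA pr.1 cs), pvBump mm.2 (pvSigA pr.2 cs))) ([], [])

def are_sentences_anagram (s1 : String) (s2 : String) (case_sensitive : Bool) : Bool :=
  if (PySem.Chars.split₀ (PySem.Chars.strip s1.toList)).length
      ≠ (PySem.Chars.split₀ (PySem.Chars.strip s2.toList)).length then false
  else
    pvFsDictEq
      (pvSentCounters (List.zip (PySem.Chars.split₀ (PySem.Chars.strip s1.toList))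
        (PySem.Chars.split₀ (PySem.Chars.strip s2.toList))) case_sensitive).1
      (pvSentCounters (List.zip (PySem.Chars.split₀ (PySem.Chars.strip s1.toList))
        (PySem.Chars.split₀ (PySem.Chars.strip s2.toList))) case_sensitive).2

-- ===== PORT B =====
def pvAlphaB (cs : Bool) : List Char :=
  "abcdefghijklmnopqrstuvwxyz0123456789".toList ++
    (if cs then "ABCDEFGHIJKLMNOPQRSTUVWXYZ".toList else [])

-- sig(w): lowercase unless case_sensitive, keep alphabet chars, sort them
def pvSigB (w : List Char) (cs : Bool) : List Char :=
  let w1 := if cs then w else PySem.Chars.lower w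
  PySem.List.sorted (w1.filter (fun c => (pvAlphaB cs).contains c)) (fun c => c) false

-- the +1 loop over words1 followed by the -1 loop over words2
def pvBalance (ws1 ws2 : List (List Char)) (cs : Bool) : PySem.Dict (List Char) Int :=
  ws2.foldl (fun d w => d.insert (pvSigB w cs) (d.getD (pvSigB w cs) 0 - 1))
    (ws1.foldl (fun d w => d.insert (pvSigB w cs) (d.getD (pvSigB w cs) 0 + 1)) PySem.Dict.empty)

def are_sentences_anagram_alt (s1 : String) (s2 : String) (case_sensitive : Bool) : Bool :=
  if (PySem.Chars.split₀ s1.toList).length ≠ (PySem.Chars.split₀ s2.toList).length then false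
  else
    (pvBalance (PySem.Chars.split₀ s1.toList) (PySem.Chars.split₀ s2.toList)
      case_sensitive).values.all (fun v => v == 0)

-- ===== PRECONDITION & SPEC =====
def Spec_are_sentences_anagram (s1 : String) (s2 : String) (case_sensitive : Bool) (out : Bool) : Prop := out = are_sentences_anagram_alt s1 s2 case_sensitive
instance (s1 : String) (s2 : String) (case_sensitive : Bool) (out : Bool) : Decidable (Spec_are_sentences_anagram s1 s2 case_sensitive out) := by unfold Spec_are_sentences_anagram; infer_instance

-- ===== CLAIM (what is proved, stated in full; the proofs are below) =====
def Claim_equal_are_sentences_anagram : Prop := ∀ (s1 : String) (s2 : String) (case_sensitive : Bool), Dom_are_sentences_anagram s1 s2 case_sensitive → Spec_are_sentences_anagram s1 s2 case_sensitive (are_sentences_anagram s1 s2 case_sensitive)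

-- ===== LEMMAS AND PROOFS =====

-- the word as each side processes it before filtering/counting
def pvProc (cs : Bool) (w : List Char) : List Char := if cs then w else PySem.Chars.lower w

-- k is a possible A-side signature
def pvIsSig (cs : Bool) (k : PySem.Set (Char × Int)) : Prop := ∃ w, k = pvSigA w cs

-- ---- alphabet facts ----
lemma pvAlphaA_nodup (cs : Bool) : (pvAlphaA cs).Nodup := by cases cs <;> decide

lemma pvAlphaB_split : "abcdefghijklmnopqrstuvwxyz0123456789".toList
    = "abcdefghijklmnopqrstuvwxyz".toList ++ "0123456789".toList := rfl

lemma pvAlphaB_perm (cs : Bool) : (pvAlphaB cs).Perm (pvAlphaA cs) := by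
  cases cs
  · simp [pvAlphaA, pvAlphaB, pvAlphaB_split]
  · simp only [pvAlphaA, pvAlphaB, pvAlphaB_split, if_true]
    have h := List.Perm.append_left "abcdefghijklmnopqrstuvwxyz".toList
      (List.perm_append_comm (l₁ := "0123456789".toList)
        (l₂ := "ABCDEFGHIJKLMNOPQRSTUVWXYZ".toList))
    simpa [List.append_assoc] using h

set_option maxRecDepth 4096 in
lemma pvAlphaA_not_space_all (cs : Bool) :
    (pvAlphaA cs).all (fun c => !PySem.Chars.isspace c) = true := by
  cases cs <;> decide

lemma pvAlphaA_not_space (cs : Bool) : ∀ c ∈ pvAlphaA cs, PySem.Chars.isspace c = false := by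
  intro c hc
  have := List.all_eq_true.1 (pvAlphaA_not_space_all cs) c hc
  simpa using this

-- ---- split₀ ignores the outer strip ----
lemma split₀_go_spaces (t : List Char) (cur : List Char) (acc : List (List Char))
    (ht : ∀ c ∈ t, PySem.Chars.isspace c = true) :
    PySem.Chars.split₀.go t cur acc = PySem.Chars.split₀.go [] cur acc := by
  induction t generalizing cur acc with
  | nil => rfl
  | cons c rest ih =>
    have hc : PySem.Chars.isspace c = true := ht c (List.mem_cons_self ..)
    have hrest : ∀ x ∈ rest, PySem.Chars.isspace x = true :=
      fun x hx => ht x (List.mem_cons_of_mem _ hx)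
    by_cases hcur : cur = []
    · subst hcur
      simp only [PySem.Chars.split₀.go, hc, if_true, List.isEmpty_nil]
      exact ih [] acc hrest
    · have hne : cur.isEmpty = false := by simp [List.isEmpty_eq_false_iff, hcur]
      simp only [PySem.Chars.split₀.go, hc, if_true, hne, Bool.false_eq_true, if_false]
      exact ih [] (cur.reverse :: acc) hrest

lemma split₀_go_append_spaces (s t : List Char) (cur : List Char) (acc : List (List Char))
    (ht : ∀ c ∈ t, PySem.Chars.isspace c = true) :
    PySem.Chars.split₀.go (s ++ t) cur acc = PySem.Chars.split₀.go s cur acc := by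
  induction s generalizing cur acc with
  | nil => simpa using split₀_go_spaces t cur acc ht
  | cons c rest ih =>
    show PySem.Chars.split₀.go (c :: (rest ++ t)) cur acc = _
    by_cases hc : PySem.Chars.isspace c = true
    · by_cases hcur : cur = []
      · subst hcur
        simp only [PySem.Chars.split₀.go, hc, if_true, List.isEmpty_nil]
        exact ih [] acc
      · have hne : cur.isEmpty = false := by simp [List.isEmpty_eq_false_iff, hcur]
        simp only [PySem.Chars.split₀.go, hc, if_true, hne, Bool.false_eq_true, if_false]
        exact ih [] (cur.reverse :: acc)
    · have hc' : PySem.Chars.isspace c = false := by simpa using hc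
      simp only [PySem.Chars.split₀.go, hc', Bool.false_eq_true, if_false]
      exact ih (c :: cur) acc

lemma split₀_strip (l : List Char) :
    PySem.Chars.split₀ (PySem.Chars.strip l) = PySem.Chars.split₀ l := by
  have hr : ∀ u : List Char, PySem.Chars.split₀ (PySem.Chars.rstrip u) = PySem.Chars.split₀ u := by
    intro u
    have hu : u = PySem.Chars.rstrip u ++ (u.reverse.takeWhile PySem.Chars.isspace).reverse := by
      have h0 : u.reverse.reverse
          = (u.reverse.dropWhile PySem.Chars.isspace).reverse
            ++ (u.reverse.takeWhile PySem.Chars.isspace).reverse := by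
        conv_lhs =>
          rw [← List.takeWhile_append_dropWhile (p := PySem.Chars.isspace) (l := u.reverse)]
        rw [List.reverse_append]
      rw [List.reverse_reverse] at h0
      exact h0
    have ht : ∀ c ∈ (u.reverse.takeWhile PySem.Chars.isspace).reverse,
        PySem.Chars.isspace c = true := by
      intro c hc
      exact List.mem_takeWhile_imp (List.mem_reverse.1 hc)
    conv_rhs => rw [hu]
    exact (split₀_go_append_spaces _ _ [] [] ht).symm
  have hl : PySem.Chars.split₀ (PySem.Chars.lstrip l) = PySem.Chars.split₀ l := by
    show PySem.Chars.split₀.go (l.dropWhile PySem.Chars.isspace) [] []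
      = PySem.Chars.split₀.go l [] []
    induction l with
    | nil => rfl
    | cons c rest ih =>
      by_cases hc : PySem.Chars.isspace c = true
      · rw [List.dropWhile_cons_of_pos hc]
        rw [ih]
        simp only [PySem.Chars.split₀.go, hc, if_true, List.isEmpty_nil]
      · rw [List.dropWhile_cons_of_neg (by simp [hc])]
  show PySem.Chars.split₀ (PySem.Chars.rstrip (PySem.Chars.lstrip l)) = _
  rw [hr, hl]

-- ---- A's per-word dict ----
lemma foldCount_keys (u : List Char) (d : PySem.Dict Char Int) :
    (u.foldl (fun d c => if d.contains c then d.insert c (d.getD c 0 + 1) else d) d).keys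
      = d.keys := by
  induction u generalizing d with
  | nil => rfl
  | cons x u ih =>
    by_cases hx : d.contains x = true
    · simp only [List.foldl_cons, hx, if_true]
      rw [ih, PySem.Dict.keys_insert_of_contains d _ hx]
    · simp only [List.foldl_cons, hx, Bool.false_eq_true, if_false]
      exact ih d

lemma foldCount_getD (u : List Char) (d : PySem.Dict Char Int) (c : Char)
    (hc : d.contains c = true) :
    (u.foldl (fun d c => if d.contains c then d.insert c (d.getD c 0 + 1) else d) d).getD c 0
      = d.getD c 0 + u.count c := by
  induction u generalizing d with
  | nil => simp
  | cons x u ih =>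
    by_cases hx : d.contains x = true
    · simp only [List.foldl_cons, hx, if_true]
      have hc' : (d.insert x (d.getD x 0 + 1)).contains c = true := by
        rw [PySem.Dict.contains_insert]
        simp [hc]
      rw [ih _ hc']
      by_cases hcx : c = x
      · subst hcx
        rw [PySem.Dict.getD_insert]
        simp [List.count_cons]
        push_cast
        ring
      · rw [PySem.Dict.getD_insert, if_neg hcx]
        have : x ≠ c := fun h => hcx h.symm
        simp [List.count_cons, this]
    · simp only [List.foldl_cons, hx, Bool.false_eq_true, if_false]
      rw [ih _ hc]
      have hcx : x ≠ c := by
        intro h; subst h; rw [hc] at hx; exact hx rfl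
      simp [List.count_cons, hcx]

lemma wordDict_items (w : List Char) (cs : Bool) :
    (pvWordDict w cs).items
      = (pvAlphaA cs).map
          (fun c => (c, ((PySem.Chars.strip (pvProc cs w)).count c : Int))) := by
  have hnd := pvAlphaA_nodup cs
  have hd0 : ((pvAlphaA cs).foldl (fun d c => d.insert c (0 : Int)) PySem.Dict.empty).items
      = (pvAlphaA cs).map (fun c => (c, (0 : Int))) := by
    have := PySem.Dict.items_foldl_insert_fresh (l := pvAlphaA cs) (k := fun c => c)
      (v := fun _ => (0 : Int)) (d := PySem.Dict.empty)
      (by intro a _; exact PySem.Dict.contains_empty a)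
      (by simpa using hnd)
    simpa using this
  set d0 : PySem.Dict Char Int :=
    (pvAlphaA cs).foldl (fun d c => d.insert c (0 : Int)) PySem.Dict.empty with hd0def
  have hkeys0 : d0.keys = pvAlphaA cs := by
    show d0.items.map Prod.fst = _
    rw [hd0, List.map_map]
    simp [Function.comp_def]
  have hkeysnd : d0.keys.Nodup := by rw [hkeys0]; exact hnd
  have hcont : ∀ c ∈ pvAlphaA cs, d0.contains c = true := by
    intro c hcm
    rw [PySem.Dict.contains_eq_decide_mem_keys, hkeys0]
    simpa using hcm
  have hgd0 : ∀ c ∈ pvAlphaA cs, d0.getD c 0 = 0 := by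
    intro c hcm
    have hmemit : (c, (0 : Int)) ∈ d0.items := by
      rw [hd0]; exact List.mem_map_of_mem hcm
    exact PySem.Dict.getD_of_mem_items _ hmemit hkeysnd 0
  show ((PySem.Chars.strip (pvProc cs w)).foldl
      (fun d c => if d.contains c then d.insert c (d.getD c 0 + 1) else d) d0).items = _
  set u := PySem.Chars.strip (pvProc cs w) with hu
  have hkeysF : (u.foldl (fun d c => if d.contains c then d.insert c (d.getD c 0 + 1) else d) d0).keys
      = pvAlphaA cs := by rw [foldCount_keys, hkeys0]
  rw [PySem.Dict.items_eq_map_keys _ (by rw [hkeysF]; exact hnd) 0, hkeysF]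
  refine List.map_congr_left ?_
  intro c hcm
  rw [foldCount_getD u d0 c (hcont c hcm), hgd0 c hcm]
  simp

-- ---- counts survive strip for non-space chars ----
lemma count_dropWhile (p : Char → Bool) (l : List Char) (c : Char) (h : p c = false) :
    (l.dropWhile p).count c = l.count c := by
  induction l with
  | nil => rfl
  | cons a l ih =>
    by_cases ha : p a = true
    · rw [List.dropWhile_cons_of_pos ha, ih]
      have hac : a ≠ c := by intro h2; subst h2; rw [h] at ha; exact absurd ha (by simp)
      simp [List.count_cons, hac]
    · rw [List.dropWhile_cons_of_neg (by simp [ha])]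

lemma count_strip (v : List Char) (c : Char) (h : PySem.Chars.isspace c = false) :
    (PySem.Chars.strip v).count c = v.count c := by
  show ((((v.dropWhile PySem.Chars.isspace).reverse.dropWhile PySem.Chars.isspace)).reverse).count c = _
  rw [List.count_reverse, count_dropWhile _ _ _ h, List.count_reverse,
    count_dropWhile _ _ _ h]

lemma count_filter' (q : Char → Bool) (l : List Char) (c : Char) :
    (l.filter q).count c = if q c = true then l.count c else 0 := by
  induction l with
  | nil => simp
  | cons a l ih =>
    by_cases ha : q a = true
    · rw [List.filter_cons_of_pos ha]
      by_cases hac : a = c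
      · subst hac; simp [List.count_cons, ih, ha]
      · simp [List.count_cons, hac, ih]
    · rw [List.filter_cons_of_neg (by simp [ha])]
      by_cases hac : a = c
      · subst hac; simp [List.count_cons, ih, ha]
      · simp [List.count_cons, hac, ih]

-- ---- signatures ----
lemma sigA_eq_map (w : List Char) (cs : Bool) :
    pvSigA w cs
      = (pvAlphaA cs).map
          (fun c => (c, ((PySem.Chars.strip (pvProc cs w)).count c : Int))) := by
  show PySem.Set.ofList (pvWordDict w cs).items = _
  rw [wordDict_items]
  refine PySem.Set.ofList_eq_self_of_nodup _ ?_
  exact (pvAlphaA_nodup cs).map (fun a b hab => congrArg Prod.fst hab)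

lemma sigA_eq_iff (w1 w2 : List Char) (cs : Bool) :
    pvSigA w1 cs = pvSigA w2 cs
      ↔ ∀ c ∈ pvAlphaA cs, (pvProc cs w1).count c = (pvProc cs w2).count c := by
  rw [sigA_eq_map, sigA_eq_map, List.map_inj_left]
  constructor
  · intro h c hcm
    have hsnd : ((PySem.Chars.strip (pvProc cs w1)).count c : Int)
        = ((PySem.Chars.strip (pvProc cs w2)).count c : Int) := (Prod.ext_iff.1 (h c hcm)).2
    have hcount : (PySem.Chars.strip (pvProc cs w1)).count c
        = (PySem.Chars.strip (pvProc cs w2)).count c := by exact_mod_cast hsnd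
    rwa [count_strip _ _ (pvAlphaA_not_space cs c hcm),
      count_strip _ _ (pvAlphaA_not_space cs c hcm)] at hcount
  · intro h c hcm
    have hcount := h c hcm
    rw [← count_strip (pvProc cs w1) c (pvAlphaA_not_space cs c hcm),
      ← count_strip (pvProc cs w2) c (pvAlphaA_not_space cs c hcm)] at hcount
    simp [hcount]

lemma sigA_equal_iff (a b : PySem.Set (Char × Int)) (cs : Bool)
    (ha : pvIsSig cs a) (hb : pvIsSig cs b) :
    PySem.Set.equal a b = true ↔ a = b := by
  constructor
  · intro h
    obtain ⟨w1, rfl⟩ := ha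
    obtain ⟨w2, rfl⟩ := hb
    have hmem := (PySem.Set.equal_iff _ _).1 h
    rw [sigA_eq_map, sigA_eq_map]
    refine List.map_congr_left ?_
    intro c hcm
    have h1 : (c, ((PySem.Chars.strip (pvProc cs w1)).count c : Int))
        ∈ pvSigA w1 cs := by
      rw [sigA_eq_map]; exact List.mem_map_of_mem hcm
    have h2 := (hmem _).1 h1
    rw [sigA_eq_map] at h2
    obtain ⟨c', _, hc'⟩ := List.mem_map.1 h2
    have hcc : c' = c := congrArg Prod.fst hc'
    subst hcc
    have hsnd : ((PySem.Chars.strip (pvProc cs w2)).count c' : Int)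
        = ((PySem.Chars.strip (pvProc cs w1)).count c' : Int) := (Prod.ext_iff.1 hc').2
    simp [hsnd]
  · intro h
    subst h
    exact (PySem.Set.equal_iff _ _).2 (fun x => Iff.rfl)

lemma sigB_eq_iff (w1 w2 : List Char) (cs : Bool) :
    pvSigB w1 cs = pvSigB w2 cs
      ↔ ∀ c ∈ pvAlphaA cs, (pvProc cs w1).count c = (pvProc cs w2).count c := by
  show PySem.List.sorted ((pvProc cs w1).filter _) (fun c => c) false
      = PySem.List.sorted ((pvProc cs w2).filter _) (fun c => c) false ↔ _
  rw [PySem.List.sorted_id_eq_sorted_id_iff_perm, List.perm_iff_count]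
  constructor
  · intro h c hcm
    have hq : (pvAlphaB cs).contains c = true := by
      have : c ∈ pvAlphaB cs := (pvAlphaB_perm cs).mem_iff.2 hcm
      simpa using this
    have := h c
    rwa [count_filter' _ _ _ , count_filter' _ _ _, if_pos hq, if_pos hq] at this
  · intro h c
    rw [count_filter', count_filter']
    by_cases hq : (pvAlphaB cs).contains c = true
    · have hcm : c ∈ pvAlphaA cs := (pvAlphaB_perm cs).mem_iff.1 (by simpa using hq)
      rw [if_pos hq, if_pos hq]
      exact h c hcm
    · rw [if_neg hq, if_neg hq]

lemma sig_iff (w1 w2 : List Char) (cs : Bool) :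
    pvSigA w1 cs = pvSigA w2 cs ↔ pvSigB w1 cs = pvSigB w2 cs := by
  rw [sigA_eq_iff, sigB_eq_iff]

-- ---- A's frozenset-keyed counters ----
lemma mem_dedup' {α : Type} [BEq α] [LawfulBEq α] {x : α} {xs : List α} :
    x ∈ PySem.List.dedup xs ↔ x ∈ xs := PySem.List.mem_dedup xs x

lemma dedup_append_singleton (xs : List (PySem.Set (Char × Int))) (x : PySem.Set (Char × Int)) :
    PySem.List.dedup (xs ++ [x])
      = if x ∈ xs then PySem.List.dedup xs else PySem.List.dedup xs ++ [x] := by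
  have h1 : ∀ (l : List (PySem.Set (Char × Int))), PySem.List.dedup l = PySem.Set.ofList l := by
    intro l; simp
  rw [h1, h1, PySem.Set.ofList_eq_foldl, PySem.Set.ofList_eq_foldl, List.foldl_append,
    List.foldl_cons, List.foldl_nil]
  show PySem.Set.add _ x = _
  have h2 : (List.foldl PySem.Set.add [] xs) = PySem.Set.ofList xs :=
    (PySem.Set.ofList_eq_foldl xs).symm
  rw [h2]
  by_cases hx : x ∈ xs
  · rw [if_pos hx]
    simp [PySem.Set.add, hx]
  · rw [if_neg hx]
    simp [PySem.Set.add, hx]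

lemma fsGet_map (L : List (PySem.Set (Char × Int))) (f : PySem.Set (Char × Int) → Int)
    (k : PySem.Set (Char × Int)) (cs : Bool)
    (hL : ∀ x ∈ L, pvIsSig cs x) (hk : pvIsSig cs k) :
    pvFsGet? (L.map (fun x => (x, f x))) k = if k ∈ L then some (f k) else none := by
  induction L with
  | nil => simp [pvFsGet?]
  | cons x L ih =>
    have hx := hL x (List.mem_cons_self ..)
    have hL' : ∀ y ∈ L, pvIsSig cs y := fun y hy => hL y (List.mem_cons_of_mem _ hy)
    show (if PySem.Set.equal x k then some (f x) else pvFsGet? (L.map _) k) = _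
    by_cases hxk : x = k
    · subst hxk
      rw [if_pos ((sigA_equal_iff x x cs hx hx).2 rfl)]
      simp
    · have hne : PySem.Set.equal x k = false := by
        rw [← Bool.not_eq_true]
        intro hcontra
        exact hxk ((sigA_equal_iff x k cs hx hk).1 hcontra)
      rw [hne]
      simp only [Bool.false_eq_true, if_false]
      rw [ih hL']
      by_cases hkL : k ∈ L
      · rw [if_pos hkL, if_pos (List.mem_cons_of_mem _ hkL)]
      · rw [if_neg hkL, if_neg (by
          intro hmem
          rcases List.mem_cons.1 hmem with h | h
          · exact hxk h.symm
          · exact hkL h)]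

lemma bump_map (L : List (PySem.Set (Char × Int))) (f : PySem.Set (Char × Int) → Int)
    (x : PySem.Set (Char × Int)) (cs : Bool)
    (hL : ∀ y ∈ L, pvIsSig cs y) (hx : pvIsSig cs x) (hnd : L.Nodup) :
    pvBump (L.map (fun y => (y, f y))) x
      = if x ∈ L then L.map (fun y => (y, if y = x then f y + 1 else f y))
        else L.map (fun y => (y, f y)) ++ [(x, 1)] := by
  induction L with
  | nil => simp [pvBump]
  | cons y L ih =>
    have hy := hL y (List.mem_cons_self ..)
    have hL' : ∀ z ∈ L, pvIsSig cs z := fun z hz => hL z (List.mem_cons_of_mem _ hz)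
    have hndL : L.Nodup := hnd.of_cons
    have hyL : y ∉ L := (List.nodup_cons.1 hnd).1
    show (if PySem.Set.equal y x then ((y, f y + 1) :: L.map _) else (y, f y) :: pvBump (L.map _) x) = _
    by_cases hyx : y = x
    · subst hyx
      rw [if_pos ((sigA_equal_iff y y cs hy hy).2 rfl)]
      rw [if_pos (List.mem_cons_self ..)]
      simp only [List.map_cons, if_pos rfl]
      congr 1
      refine (List.map_congr_left ?_).symm
      intro z hz
      have : z ≠ y := fun h => hyL (h ▸ hz)
      simp [this]
    · have hne : PySem.Set.equal y x = false := by
        rw [← Bool.not_eq_true]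
        intro hcontra
        exact hyx ((sigA_equal_iff y x cs hy hx).1 hcontra)
      rw [hne]
      simp only [Bool.false_eq_true, if_false]
      rw [ih hL' hndL]
      by_cases hxL : x ∈ L
      · rw [if_pos hxL, if_pos (List.mem_cons_of_mem _ hxL)]
        simp only [List.map_cons]
        congr 1
        simp [hyx]
      · have : x ∉ y :: L := by
          intro hmem
          rcases List.mem_cons.1 hmem with h | h
          · exact hyx h.symm
          · exact hxL h
        rw [if_neg hxL, if_neg this]
        simp

lemma fsCtr_spec (cs : Bool) (xs : List (PySem.Set (Char × Int)))
    (hxs : ∀ k ∈ xs, pvIsSig cs k) :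
    xs.foldl pvBump []
      = (PySem.List.dedup xs).map (fun k => (k, (xs.count k : Int))) := by
  induction xs using List.reverseRecOn with
  | nil => rfl
  | append_singleton xs x ih =>
    have hxs' : ∀ k ∈ xs, pvIsSig cs k := fun k hk => hxs k (List.mem_append_left _ hk)
    have hx : pvIsSig cs x := hxs x (List.mem_append_right _ (List.mem_cons_self ..))
    rw [List.foldl_append, List.foldl_cons, List.foldl_nil, ih hxs']
    rw [bump_map (PySem.List.dedup xs) (fun k => (xs.count k : Int)) x cs
      (fun y hy => hxs' y (mem_dedup'.1 hy)) hx (PySem.List.nodup_dedup xs)]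
    rw [dedup_append_singleton]
    by_cases hx2 : x ∈ xs
    · rw [if_pos (mem_dedup'.2 hx2), if_pos hx2]
      refine List.map_congr_left ?_
      intro k hk
      by_cases hkx : k = x
      · subst hkx
        simp [List.count_append]
      · have : x ≠ k := fun h => hkx h.symm
        simp [hkx, List.count_append, this]
    · rw [if_neg (fun h => hx2 (mem_dedup'.1 h)), if_neg hx2, List.map_append]
      congr 1
      · refine List.map_congr_left ?_
        intro k hk
        have hkmem : k ∈ xs := mem_dedup'.1 hk
        have hxk : x ≠ k := fun h => hx2 (h ▸ hkmem)
        simp [List.count_append, hxk]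
      · have h0 : xs.count x = 0 := List.count_eq_zero_of_not_mem hx2
        simp [List.count_append, h0]

lemma fsDictEq_iff (cs : Bool) (xs ys : List (PySem.Set (Char × Int)))
    (hxs : ∀ k ∈ xs, pvIsSig cs k) (hys : ∀ k ∈ ys, pvIsSig cs k) :
    pvFsDictEq (xs.foldl pvBump []) (ys.foldl pvBump []) = true
      ↔ ∀ k, xs.count k = ys.count k := by
  rw [fsCtr_spec cs xs hxs, fsCtr_spec cs ys hys]
  unfold pvFsDictEq
  rw [Bool.and_eq_true, List.all_eq_true, beq_iff_eq, List.length_map, List.length_map]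
  have hgetm2 : ∀ k, pvIsSig cs k →
      pvFsGet? ((PySem.List.dedup ys).map (fun k => (k, (ys.count k : Int)))) k
        = if k ∈ PySem.List.dedup ys then some ((ys.count k : Int)) else none := by
    intro k hk
    exact fsGet_map _ _ _ cs (fun y hy => hys y (mem_dedup'.1 hy)) hk
  constructor
  · rintro ⟨hlen, hall⟩ k
    have hget : ∀ k', k' ∈ PySem.List.dedup xs →
        k' ∈ PySem.List.dedup ys ∧ ys.count k' = xs.count k' := by
      intro k' hk'
      have hsig : pvIsSig cs k' := hxs k' (mem_dedup'.1 hk')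
      have h2 := hall _ (List.mem_map_of_mem hk')
      rw [hgetm2 k' hsig] at h2
      by_cases hmem : k' ∈ PySem.List.dedup ys
      · rw [if_pos hmem] at h2
        refine ⟨hmem, ?_⟩
        have h3 : ((ys.count k' : Int)) = ((xs.count k' : Int)) :=
          Option.some_inj.1 (beq_iff_eq.1 h2)
        exact_mod_cast h3
      · rw [if_neg hmem] at h2
        simp at h2
    by_cases hk1 : k ∈ xs
    · exact (hget k (mem_dedup'.2 hk1)).2.symm
    · by_cases hk2 : k ∈ ys
      · exfalso
        have hsub : PySem.List.dedup xs ⊆ PySem.List.dedup ys := fun a ha => (hget a ha).1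
        have hperm := (List.Nodup.subperm (PySem.List.nodup_dedup xs) hsub).perm_of_length_le
          (le_of_eq hlen.symm)
        have : k ∈ PySem.List.dedup xs := hperm.symm.subset (mem_dedup'.2 hk2)
        exact hk1 (mem_dedup'.1 this)
      · rw [List.count_eq_zero_of_not_mem hk1, List.count_eq_zero_of_not_mem hk2]
  · intro h
    have hmemiff : ∀ k, k ∈ PySem.List.dedup xs ↔ k ∈ PySem.List.dedup ys := by
      intro k
      rw [mem_dedup', mem_dedup', ← List.count_pos_iff,
        ← List.count_pos_iff, h k]
    have hperm : (PySem.List.dedup xs).Perm (PySem.List.dedup ys) :=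
      (List.perm_ext_iff_of_nodup (PySem.List.nodup_dedup xs) (PySem.List.nodup_dedup ys)).2
        hmemiff
    refine ⟨hperm.length_eq, ?_⟩
    intro p hp
    obtain ⟨k, hk, rfl⟩ := List.mem_map.1 hp
    have hsig : pvIsSig cs k := hxs k (mem_dedup'.1 hk)
    rw [hgetm2 k hsig, if_pos ((hmemiff k).1 hk)]
    simp [h k]

-- ---- B's balance dict ----
lemma decFold_getD (ys : List (List Char)) (d : PySem.Dict (List Char) Int) (k : List Char) :
    (ys.foldl (fun d k => d.insert k (d.getD k 0 - 1)) d).getD k 0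
      = d.getD k 0 - ys.count k := by
  induction ys generalizing d with
  | nil => simp
  | cons y ys ih =>
    simp only [List.foldl_cons]
    rw [ih, PySem.Dict.getD_insert]
    by_cases hky : k = y
    · subst hky
      simp only [if_pos rfl, List.count_cons, BEq.rfl, if_true]
      push_cast
      ring
    · have hyk : y ≠ k := fun h => hky h.symm
      simp [hky, List.count_cons, hyk]

lemma decFold_contains (ys : List (List Char)) (d : PySem.Dict (List Char) Int) (k : List Char) :
    (ys.foldl (fun d k => d.insert k (d.getD k 0 - 1)) d).contains k
      = (d.contains k || ys.contains k) := by
  induction ys generalizing d with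
  | nil => simp
  | cons y ys ih =>
    simp only [List.foldl_cons]
    rw [ih, PySem.Dict.contains_insert]
    by_cases hky : k = y
    · subst hky
      simp [List.contains_cons]
    · have h1 : (k == y) = false := beq_eq_false_iff_ne.2 hky
      have h2 : (y == k) = false := beq_eq_false_iff_ne.2 (fun h => hky h.symm)
      simp [List.contains_cons, h1, h2, hky]

lemma balance_iff (sigs1 sigs2 : List (List Char)) :
    ((sigs2.foldl (fun d k => d.insert k (d.getD k 0 - 1))
        (PySem.Dict.counter sigs1)).values.all (fun v => v == 0)) = true
      ↔ ∀ k, sigs1.count k = sigs2.count k := by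
  set b1 := PySem.Dict.counter sigs1 with hb1
  set b2 := sigs2.foldl (fun d k => d.insert k (d.getD k 0 - 1)) b1 with hb2
  have hnd : b2.keys.Nodup :=
    PySem.Dict.nodup_keys_foldl_insert _ _ _ (PySem.Dict.nodup_keys_counter _)
  have hgd : ∀ k, b2.getD k 0 = (sigs1.count k : Int) - sigs2.count k := by
    intro k
    rw [hb2, decFold_getD, hb1, PySem.Dict.getD_counter]
  have hmem : ∀ k, k ∈ b2.keys ↔ (k ∈ sigs1 ∨ k ∈ sigs2) := by
    intro k
    have hc : b2.contains k = (sigs1.contains k || sigs2.contains k) := by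
      rw [hb2, decFold_contains, hb1, PySem.Dict.contains_counter]
    constructor
    · intro hk
      have : b2.contains k = true := by
        rw [PySem.Dict.contains_eq_decide_mem_keys]
        simpa using hk
      rw [hc] at this
      rcases Bool.or_eq_true_iff.1 this with h | h
      · exact Or.inl (by simpa using h)
      · exact Or.inr (by simpa using h)
    · intro hk
      have : b2.contains k = true := by
        rw [hc]
        rcases hk with h | h
        · simp [h]
        · simp [h]
      rw [PySem.Dict.contains_eq_decide_mem_keys] at this
      simpa using this
  rw [PySem.Dict.values_eq_map_keys b2 hnd 0, List.all_map, List.all_eq_true]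
  constructor
  · intro hall k
    by_cases hk : k ∈ sigs1 ∨ k ∈ sigs2
    · have := hall k ((hmem k).2 hk)
      simp only [Function.comp_apply, beq_iff_eq] at this
      rw [hgd k] at this
      omega
    · push_neg at hk
      rw [List.count_eq_zero_of_not_mem hk.1, List.count_eq_zero_of_not_mem hk.2]
  · intro h k hk
    simp only [Function.comp_apply, beq_iff_eq]
    rw [hgd k, h k]
    ring

-- ---- multiset bridge between the two signature functions ----
lemma count_map_aux {α β : Type} [BEq α] [LawfulBEq α] [BEq β] [LawfulBEq β]
    (f : List Char → α) (g : List Char → β)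
    (h : ∀ a b, f a = f b ↔ g a = g b) (w1 w2 : List (List Char))
    (hf : ∀ k, ((w1.map f).count k = (w2.map f).count k)) :
    ∀ k, (w1.map g).count k = (w2.map g).count k := by
  have cmc : ∀ {γ : Type} [BEq γ] (h : List Char → γ) (w : List (List Char)) (y : γ),
      (w.map h).count y = w.countP (fun x => h x == y) := by
    intro γ _ h w y
    induction w with
    | nil => rfl
    | cons b w ih => simp [List.count_cons, List.countP_cons, ih]
  have chain : ∀ (a : List Char) (w : List (List Char)),
      (w.map g).count (g a) = (w.map f).count (f a) := by
    intro a w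
    rw [cmc g w (g a), cmc f w (f a)]
    refine List.countP_congr ?_
    intro x _
    simp only [beq_iff_eq]
    exact (h x a).symm
  intro k
  by_cases h1 : ∃ a ∈ w1, g a = k
  · obtain ⟨a, _, rfl⟩ := h1
    rw [chain a w1, chain a w2, hf (f a)]
  · by_cases h2 : ∃ a ∈ w2, g a = k
    · obtain ⟨a, _, rfl⟩ := h2
      rw [chain a w1, chain a w2, hf (f a)]
    · have hz1 : k ∉ w1.map g := by
        intro hmem
        obtain ⟨a, ha, hak⟩ := List.mem_map.1 hmem
        exact h1 ⟨a, ha, hak⟩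
      have hz2 : k ∉ w2.map g := by
        intro hmem
        obtain ⟨a, ha, hak⟩ := List.mem_map.1 hmem
        exact h2 ⟨a, ha, hak⟩
      rw [List.count_eq_zero_of_not_mem hz1, List.count_eq_zero_of_not_mem hz2]

lemma sentCounters_eq (cs : Bool) (W1 W2 : List (List Char)) (hlen : W1.length = W2.length) :
    pvSentCounters (List.zip W1 W2) cs
      = ((W1.map (fun w => pvSigA w cs)).foldl pvBump [],
         (W2.map (fun w => pvSigA w cs)).foldl pvBump []) := by
  show (List.zip W1 W2).foldl _ ([], []) = _
  have gen : ∀ (W1 W2 : List (List Char)) (m1 m2 : List (PySem.Set (Char × Int) × Int)),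
      W1.length = W2.length →
      (List.zip W1 W2).foldl
        (fun mm pr => (pvBump mm.1 (pvSigA pr.1 cs), pvBump mm.2 (pvSigA pr.2 cs))) (m1, m2)
      = ((W1.map (fun w => pvSigA w cs)).foldl pvBump m1,
         (W2.map (fun w => pvSigA w cs)).foldl pvBump m2) := by
    intro W1
    induction W1 with
    | nil =>
      intro W2 m1 m2 h
      have : W2 = [] := List.eq_nil_of_length_eq_zero h.symm
      subst this
      rfl
    | cons w1 W1 ih =>
      intro W2 m1 m2 h
      cases W2 with
      | nil => simp at h
      | cons w2 W2 =>
        simp only [List.zip_cons_cons, List.foldl_cons, List.map_cons]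
        exact ih W2 _ _ (by simpa using h)
  exact gen W1 W2 [] [] hlen

lemma balance_eq (cs : Bool) (W1 W2 : List (List Char)) :
    pvBalance W1 W2 cs
      = (W2.map (fun w => pvSigB w cs)).foldl (fun d k => d.insert k (d.getD k 0 - 1))
          (PySem.Dict.counter (W1.map (fun w => pvSigB w cs))) := by
  show W2.foldl _ _ = _
  rw [← PySem.Dict.foldl_insert_getD_add_one_eq_counter, List.foldl_map, List.foldl_map]

-- ===== VERDICT (by name: the statement is the Claim_ definition above) =====
theorem are_sentences_anagram_spec : Claim_equal_are_sentences_anagram := by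
  intro s1 s2 cs _
  unfold Spec_are_sentences_anagram are_sentences_anagram are_sentences_anagram_alt
  rw [split₀_strip, split₀_strip]
  set W1 := PySem.Chars.split₀ s1.toList with hW1
  set W2 := PySem.Chars.split₀ s2.toList with hW2
  by_cases hlen : W1.length ≠ W2.length
  · rw [if_pos hlen, if_pos hlen]
  · rw [if_neg hlen, if_neg hlen]
    push_neg at hlen
    rw [sentCounters_eq cs W1 W2 hlen, balance_eq cs W1 W2]
    rw [Bool.eq_iff_iff]
    rw [fsDictEq_iff cs _ _
      (by intro k hk; obtain ⟨w, _, hw⟩ := List.mem_map.1 hk; exact ⟨w, hw.symm⟩)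
      (by intro k hk; obtain ⟨w, _, hw⟩ := List.mem_map.1 hk; exact ⟨w, hw.symm⟩)]
    rw [balance_iff]
    constructor
    · intro h
      exact count_map_aux (fun w => pvSigA w cs) (fun w => pvSigB w cs)
        (fun a b => sig_iff a b cs) W1 W2 h
    · intro h
      exact count_map_aux (fun w => pvSigB w cs) (fun w => pvSigA w cs)
        (fun a b => (sig_iff a b cs).symm) W1 W2 h
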